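-- pv_equiv track=rewrite | github.com/Hugekyung/teamnote1 | codingTest/summer_internship2_N.py | solution
-- ===== SOURCE A (Python) =====
-- def solution(t, r):
--     info = []
--     result = []
--     for i in range(len(t)):
--         info.append((t[i], r[i], i)) # (도착시각, 티켓등급, 아이디 값)
--     info = sorted(info, key=lambda x: (x[0], x[1], x[2]))
--     for i in range(len(info)):
--         for j in range(i, len(info)):
--             if i == j:
--                 continue
--             if info[i][0] >= info[j][0]:
--                 if info[i][1] <= info[j][1]:
--                     result.append(info[i][2])
--                 else:
--                     result.append(info[j][2])
--             else:
--                 result.append(info[i][2])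
--     return result
-- ===== SOURCE B (Python) =====
-- def solution(t, r):
--     # Sorted by (arrival, grade, index) the inner comparison of A always picks the
--     # earlier element's id, so each sorted position k contributes its id (n-1-k) times.
--     n = len(t)
--     info = sorted(zip(t, r, range(n)))
--     result = []
--     for k, (_tk, _rk, idx) in enumerate(info):
--         result += [idx] * (n - 1 - k)
--     return result
-- ===== Notes on version B (the rewrite author's own statement) =====
-- stated objective: simpler
-- what changed: Keeps the sort by (arrival, grade, index) but replaces A's quadratic double loop with per-pair branching by a single pass over the sorted list that emits each element's id (n-1-k) times, since the sort order makes every branch pick the earlier element's id.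
import Mathlib
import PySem

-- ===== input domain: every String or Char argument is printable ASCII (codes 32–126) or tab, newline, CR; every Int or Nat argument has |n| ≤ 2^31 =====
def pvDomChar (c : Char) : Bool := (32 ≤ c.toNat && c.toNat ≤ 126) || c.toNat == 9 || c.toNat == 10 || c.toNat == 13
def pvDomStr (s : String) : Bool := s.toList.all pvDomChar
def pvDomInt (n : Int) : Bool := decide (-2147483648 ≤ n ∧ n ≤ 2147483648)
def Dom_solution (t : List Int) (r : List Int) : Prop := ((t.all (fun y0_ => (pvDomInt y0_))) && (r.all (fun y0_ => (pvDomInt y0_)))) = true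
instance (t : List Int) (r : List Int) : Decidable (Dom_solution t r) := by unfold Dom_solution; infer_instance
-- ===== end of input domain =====

-- B replaces A's quadratic nested pair loop with one pass over the sorted list that
-- emits each id (n-1-k) times (objective: simpler; same sort, no per-pair branching).

-- ===== PORT A =====
-- Python tuple comparison (x[0], x[1], x[2]) is lexicographic: modelled exactly by toLex
def pvKey (x : Int × Int × Int) : Int ×ₗ (Int ×ₗ Int) := toLex (x.1, toLex (x.2.1, x.2.2))

def solution (t : List Int) (r : List Int) : List Int :=
  -- i ranges over range(len(t)), so i ≥ 0; r[i] out of range (IndexError) is excluded by Pre_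
  let info : List (Int × Int × Int) :=
    (List.range t.length).foldl (fun acc (i : Nat) =>
      acc ++ [(PySem.List.pyGetD t (i : Int) 0, PySem.List.pyGetD r (i : Int) 0, (i : Int))]) []
  let info := PySem.List.sorted info pvKey
  (List.range info.length).foldl (fun result i =>
    (List.range' i (info.length - i)).foldl (fun result j =>
      if i == j then result
      else
        let xi := info.getD i (0, 0, 0)
        let xj := info.getD j (0, 0, 0)
        if xi.1 ≥ xj.1 then
          if xi.2.1 ≤ xj.2.1 then result ++ [xi.2.2] else result ++ [xj.2.2]
        else result ++ [xi.2.2]) result) []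

-- ===== PORT B =====
def solution_alt (t : List Int) (r : List Int) : List Int :=
  let n := t.length
  -- sorted(zip(t, r, range(n))): zip truncates to the shorter list; tuples compare lexicographically
  let info := PySem.List.sorted ((t.zip r).zipIdx.map (fun p => (p.1.1, p.1.2, (p.2 : Int)))) pvKey
  (PySem.List.enumerate info).foldl (fun result p =>
      result ++ List.replicate ((n : Int) - 1 - p.1).toNat p.2.2.2) []

-- ===== PRECONDITION & SPEC =====
-- Pre_ excludes len(r) < len(t), where A raises IndexError on r[i]
def Pre_solution (t : List Int) (r : List Int) : Prop := t.length ≤ r.length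
instance (t : List Int) (r : List Int) : Decidable (Pre_solution t r) := by unfold Pre_solution; infer_instance
def pvWitness_solution : List Int × List Int := ([3, 1, 1], [2, 1, 1])

def Spec_solution (t : List Int) (r : List Int) (out : List Int) : Prop := out = solution_alt t r
instance (t : List Int) (r : List Int) (out : List Int) : Decidable (Spec_solution t r out) := by unfold Spec_solution; infer_instance

-- ===== CLAIM (what is proved, stated in full; the proofs are below) =====
def Claim_equal_solution : Prop := ∀ (t : List Int) (r : List Int), Dom_solution t r → Pre_solution t r → Spec_solution t r (solution t r)

-- ===== LEMMAS AND PROOFS =====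

-- both ports build the same pre-sort list (t[i], r[i], i)
theorem pv_build_eq (t r : List Int) (h : t.length ≤ r.length) :
    (t.zip r).zipIdx.map (fun p => (p.1.1, p.1.2, (p.2 : Int))) =
      (List.range t.length).map
        (fun (i : Nat) => (PySem.List.pyGetD t (i : Int) 0, PySem.List.pyGetD r (i : Int) 0, (i : Int))) := by
  apply List.ext_getElem
  · simp [Nat.min_eq_left h]
  · intro k h1 h2
    simp only [List.length_map, List.length_zipIdx, List.length_zip] at h1
    have hk : k < t.length := lt_of_lt_of_le h1 (min_le_left _ _)
    have hkr : k < r.length := lt_of_lt_of_le h1 (min_le_right _ _)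
    simp only [List.getElem_map, List.getElem_zipIdx, List.getElem_zip, List.getElem_range,
      PySem.List.pyGetD_natCast, List.getD_eq_getElem, hk, hkr, Nat.zero_add]

-- the sorted list is pairwise key-nondecreasing; for i < j the inner branch always appends s[i]'s id
theorem pv_branch (s : List (Int × Int × Int))
    (hp : List.Pairwise (fun a b => pvKey a ≤ pvKey b) s)
    (i j : Nat) (hi : i < s.length) (hj : j < s.length) (hij : i < j) :
    (if (s.getD i (0,0,0)).1 ≥ (s.getD j (0,0,0)).1 then
       if (s.getD i (0,0,0)).2.1 ≤ (s.getD j (0,0,0)).2.1 then (s.getD i (0,0,0)).2.2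
       else (s.getD j (0,0,0)).2.2
     else (s.getD i (0,0,0)).2.2) = (s.getD i (0,0,0)).2.2 := by
  have hkey := (List.pairwise_iff_getElem.mp hp) i j hi hj hij
  rw [List.getD_eq_getElem _ _ hi, List.getD_eq_getElem _ _ hj]
  rcases Prod.Lex.le_iff.mp hkey with hlt | ⟨heq, hrest⟩
  · simp only [pvKey, ofLex_toLex] at hlt
    rw [if_neg (by exact not_le.mpr hlt)]
  · simp only [pvKey, ofLex_toLex] at heq hrest
    have h2 : (s[i].2.1 : Int) ≤ s[j].2.1 := by
      rcases Prod.Lex.le_iff.mp hrest with h | ⟨h, _⟩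
      · simpa using le_of_lt h
      · simpa using le_of_eq h
    rw [if_pos (le_of_eq heq.symm), if_pos h2]

-- inner loop of A: for j in range(i, n) appends s[i]'s id (n-1-i) times
theorem pv_inner (s : List (Int × Int × Int))
    (hp : List.Pairwise (fun a b => pvKey a ≤ pvKey b) s)
    (i : Nat) (hi : i < s.length) (acc : List Int) :
    (List.range' i (s.length - i)).foldl (fun result j =>
      if i == j then result
      else
        let xi := s.getD i (0, 0, 0)
        let xj := s.getD j (0, 0, 0)
        if xi.1 ≥ xj.1 then
          if xi.2.1 ≤ xj.2.1 then result ++ [xi.2.2] else result ++ [xj.2.2]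
        else result ++ [xi.2.2]) acc
      = acc ++ List.replicate (s.length - 1 - i) (s.getD i (0,0,0)).2.2 := by
  have hsplit : s.length - i = (s.length - 1 - i) + 1 := by omega
  rw [hsplit, List.range'_succ, List.foldl_cons]
  simp only [beq_self_eq_true, if_true]
  rw [PySem.List.foldl_congr_mem _ _
      (fun result j => result ++ [(s.getD i (0,0,0)).2.2]) acc ?_]
  · rw [PySem.List.foldl_append_singleton_eq_map]
    congr 1
    rw [List.map_eq_replicate_iff.mpr (by intro b hb; rfl)]
    simp
  · intro a j hj
    have hmem := List.mem_range'_1.mp hj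
    have hij : i < j := by omega
    have hjlt : j < s.length := by omega
    have hne : (i == j) = false := by simp; omega
    simp only [hne, Bool.false_eq_true, if_false]
    have := pv_branch s hp i j hi hjlt hij
    split_ifs at this ⊢ <;> simp_all

-- the double loop over the sorted list equals B's one-pass replicate loop
theorem pv_loops (s : List (Int × Int × Int))
    (hp : List.Pairwise (fun a b => pvKey a ≤ pvKey b) s) (n : Nat) (hn : n = s.length) :
    (List.range s.length).foldl (fun result i =>
      (List.range' i (s.length - i)).foldl (fun result j =>
        if i == j then result
        else
          let xi := s.getD i (0, 0, 0)
          let xj := s.getD j (0, 0, 0)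
          if xi.1 ≥ xj.1 then
            if xi.2.1 ≤ xj.2.1 then result ++ [xi.2.2] else result ++ [xj.2.2]
          else result ++ [xi.2.2]) result) []
    = (PySem.List.enumerate s).foldl (fun result p =>
        result ++ List.replicate ((n : Int) - 1 - p.1).toNat p.2.2.2) [] := by
  subst hn
  rw [PySem.List.foldl_congr_mem _ _
      (fun result i => result ++ List.replicate (s.length - 1 - i) (s.getD i (0,0,0)).2.2) [] ?_]
  · rw [PySem.List.foldl_append_eq_flatMap, PySem.List.foldl_append_eq_flatMap]
    rw [PySem.List.enumerate_eq_map_pyRange s (0,0,0)]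
    simp only [PySem.List.len]
    rw [PySem.List.pyRange_zero_nat s.length]
    rw [List.flatMap_map, List.flatMap_map]
    simp only [List.nil_append, List.flatMap]
    apply congrArg
    apply List.map_congr_left
    intro k hk
    have hk' : k < s.length := List.mem_range.mp hk
    rw [PySem.List.pyGetD_natCast]
    congr 1
    omega
  · intro acc i hi
    exact pv_inner s hp i (List.mem_range.mp hi) acc

-- ===== VERDICT (by name: the statement is the Claim_ definition above) =====
theorem solution_spec : Claim_equal_solution := by
  intro t r _hdom hpre
  unfold Spec_solution solution solution_alt
  rw [PySem.List.foldl_append_singleton_eq_map, List.nil_append]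
  rw [← pv_build_eq t r hpre]
  set info := PySem.List.sorted ((t.zip r).zipIdx.map (fun p => (p.1.1, p.1.2, (p.2 : Int)))) pvKey with hinfo
  have hlen : info.length = t.length := by
    rw [hinfo, PySem.List.length_sorted]
    simp [Nat.min_eq_left hpre]
  exact pv_loops info (PySem.List.sorted_pairwise _ pvKey) t.length hlen.symm
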